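-- pv_equiv track=rewrite | github.com/MorningStar0709/trae-agent-system | skills/skill-stability-review/scripts/review_skills.py | index_at_line
-- ===== SOURCE A (Python) =====
-- def index_at_line(text: str, line: int) -> int:
--     if line <= 1:
--         return 0
--     index = 0
--     for _ in range(line - 1):
--         next_index = text.find("\n", index)
--         if next_index == -1:
--             return len(text)
--         index = next_index + 1
--     return index
-- ===== SOURCE B (Python) =====
-- def index_at_line(text: str, line: int) -> int:
--     if line <= 1:
--         return 0
--     segments = text.split("\n")
--     if line - 1 >= len(segments):
--         return len(text)
--     return sum(len(s) + 1 for s in segments[:line - 1])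
-- ===== Notes on version B (the rewrite author's own statement) =====
-- stated objective: simpler
-- what changed: Replaces the find-and-advance loop over repeated text.find('\n', index) calls with a single split('\n') followed by summing len(segment)+1 over the first line-1 segments (with the same len(text) fallback when there are fewer lines).
import Mathlib
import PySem

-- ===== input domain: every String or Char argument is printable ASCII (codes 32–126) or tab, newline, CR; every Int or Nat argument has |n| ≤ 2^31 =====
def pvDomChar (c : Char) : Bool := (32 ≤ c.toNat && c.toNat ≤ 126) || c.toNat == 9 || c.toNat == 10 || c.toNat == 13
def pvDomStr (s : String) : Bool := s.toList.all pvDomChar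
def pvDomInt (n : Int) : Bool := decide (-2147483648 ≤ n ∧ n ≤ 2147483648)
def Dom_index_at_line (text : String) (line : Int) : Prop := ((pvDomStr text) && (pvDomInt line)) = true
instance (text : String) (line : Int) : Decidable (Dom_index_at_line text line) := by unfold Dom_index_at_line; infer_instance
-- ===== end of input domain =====

-- B replaces A's find-and-advance loop by split("\n") followed by summing the lengths
-- of the first line-1 segments (objective: simpler decomposition, same behaviour).


-- ===== PORT A =====
-- the 'for _ in range(line - 1)' loop with its early returns, fuel = number of iterations
def indexLoop (text : String) : Nat → Int → Int
  | 0, index => index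
  | n + 1, index =>
    let next_index := PySem.Str.findFrom text "\n" index
    if next_index = -1 then PySem.Str.len text
    else indexLoop text n (next_index + 1)

def index_at_line (text : String) (line : Int) : Int :=
  if line ≤ 1 then 0
  else indexLoop text (line - 1).toNat 0

-- ===== PORT B =====
def index_at_line_alt (text : String) (line : Int) : Int :=
  if line ≤ 1 then 0
  else
    let segments := (PySem.Str.split? text "\n").getD []   -- split? is 'some' for the non-empty separator "\n"
    if PySem.List.len segments ≤ line - 1 then PySem.Str.len text
    else (PySem.List.slice segments none (some (line - 1))).foldl
      (fun acc s => acc + (PySem.Str.len s + 1)) 0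

-- ===== PRECONDITION & SPEC =====
def Spec_index_at_line (text : String) (line : Int) (out : Int) : Prop := out = index_at_line_alt text line
instance (text : String) (line : Int) (out : Int) : Decidable (Spec_index_at_line text line out) := by unfold Spec_index_at_line; infer_instance

-- ===== CLAIM (what is proved, stated in full; the proofs are below) =====
def Claim_equal_index_at_line : Prop := ∀ (text : String) (line : Int), Dom_index_at_line text line → Spec_index_at_line text line (index_at_line text line)

-- ===== LEMMAS AND PROOFS =====

-- index of the first '\n' in cs, or -1 (single-separator specialisation of Python's find)
def findNl : List Char → Int
  | [] => -1
  | c :: t => if c = '\n' then 0 else (if findNl t = -1 then -1 else findNl t + 1)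

-- cs.split("\n") as a direct structural recursion
def segsNl : List Char → List (List Char)
  | [] => [[]]
  | c :: t => if c = '\n' then [] :: segsNl t
              else (c :: (segsNl t).headI) :: (segsNl t).tail

-- A's loop, relative to the not-yet-scanned suffix
def loopRel : Nat → List Char → Int
  | 0, _ => 0
  | n + 1, cs =>
    if findNl cs = -1 then (cs.length : Int)
    else (findNl cs + 1) + loopRel n (cs.drop ((findNl cs).toNat + 1))

theorem findNl_cases (cs : List Char) : findNl cs = -1 ∨ (0 ≤ findNl cs ∧ findNl cs < cs.length) := by
  induction cs with
  | nil => left; rfl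
  | cons c t ih =>
    simp only [findNl]
    split
    · right; constructor <;> simp
    · rcases ih with h | h
      · simp [h]
      · right
        rw [if_neg (by omega)]
        constructor
        · omega
        · simp; omega

theorem find_go_single (cs : List Char) (k : Nat) :
    PySem.Chars.find.go ['\n'] cs k = if findNl cs = -1 then -1 else k + findNl cs := by
  induction cs generalizing k with
  | nil => simp [PySem.Chars.find.go, findNl]
  | cons c t ih =>
    by_cases hc : c = '\n'
    · subst hc
      simp [PySem.Chars.find.go, findNl, List.isPrefixOf]
    · have hpre : List.isPrefixOf ['\n'] (c :: t) = false := by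
        simp [List.isPrefixOf]; exact fun h => absurd h.symm hc
      simp only [PySem.Chars.find.go, hpre, Bool.false_eq_true, if_false, ih]
      rcases findNl_cases t with h | h
      · simp [findNl, hc, h]
      · rw [findNl, if_neg hc, if_neg (by omega)]
        split_ifs <;> omega

theorem find_single (cs : List Char) : PySem.Chars.find cs ['\n'] = findNl cs := by
  rw [PySem.Chars.find, find_go_single]
  rcases findNl_cases cs with h | h
  · simp [h]
  · rw [if_neg (by omega)]; omega

theorem headI_tail {α : Type} [Inhabited α] (l : List α) (h : l ≠ []) : l.headI :: l.tail = l := by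
  cases l with
  | nil => exact absurd rfl h
  | cons a t => rfl

theorem segsNl_ne_nil (cs : List Char) : segsNl cs ≠ [] := by
  cases cs with
  | nil => simp [segsNl]
  | cons c t => simp only [segsNl]; split <;> simp

theorem splitOn_go_single (fuel : Nat) (l cur : List Char) (acc : List (List Char))
    (h : l.length < fuel) :
    PySem.Chars.splitOn.go ['\n'] fuel l cur acc
      = acc.reverse ++ ((cur.reverse ++ (segsNl l).headI) :: (segsNl l).tail) := by
  induction fuel generalizing l cur acc with
  | zero => omega
  | succ f ih =>
    cases l with
    | nil => simp [PySem.Chars.splitOn.go, segsNl]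
    | cons c t =>
      by_cases hc : c = '\n'
      · subst hc
        rw [PySem.Chars.splitOn.go]
        rw [if_pos (by simp [List.isPrefixOf])]
        simp only [List.length_cons, List.length_nil, List.drop_succ_cons, List.drop_zero]
        rw [ih t [] (cur.reverse :: acc) (by simpa using Nat.lt_of_succ_lt_succ h)]
        have hne := segsNl_ne_nil t
        simp only [segsNl, List.reverse_cons,
          List.nil_append, List.append_assoc, List.cons_append]
        rw [← headI_tail (segsNl t) hne]
        simp
      · rw [PySem.Chars.splitOn.go]
        rw [if_neg (by simp [List.isPrefixOf]; exact fun h' => absurd h'.symm hc)]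
        rw [ih t (c :: cur) acc (by simpa using Nat.lt_of_succ_lt_succ h)]
        simp [segsNl, hc]

theorem splitOn_single (cs : List Char) : PySem.Chars.splitOn cs ['\n'] = segsNl cs := by
  rw [PySem.Chars.splitOn, splitOn_go_single _ _ _ _ (by omega)]
  simp only [List.reverse_nil, List.nil_append]
  exact headI_tail _ (segsNl_ne_nil cs)

theorem segsNl_of_neg (cs : List Char) (h : findNl cs = -1) : segsNl cs = [cs] := by
  induction cs with
  | nil => rfl
  | cons c t ih =>
    simp only [findNl] at h
    by_cases hc : c = '\n'
    · simp [hc] at h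
    · rw [if_neg hc] at h
      have ht : findNl t = -1 := by by_contra hne; rw [if_neg hne] at h; rcases findNl_cases t with h' | h' <;> omega
      simp [segsNl, hc, ih ht]

theorem segsNl_of_pos (cs : List Char) (h : 0 ≤ findNl cs) :
    segsNl cs = cs.take (findNl cs).toNat :: segsNl (cs.drop ((findNl cs).toNat + 1)) := by
  induction cs with
  | nil => simp [findNl] at h
  | cons c t ih =>
    by_cases hc : c = '\n'
    · subst hc; simp [segsNl, findNl]
    · have hfc : findNl (c :: t) = findNl t + 1 := by
        rw [findNl, if_neg hc]
        rcases findNl_cases t with h' | h'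
        · exfalso; rw [findNl, if_neg hc, h'] at h; simp at h
        · rw [if_neg (show ¬(findNl t = -1) by omega)]
      have hpos : 0 ≤ findNl t := by
        rcases findNl_cases t with h' | h'
        · exfalso; rw [findNl, if_neg hc, if_pos h'] at h; omega
        · omega
      rw [segsNl, if_neg hc, ih hpos, hfc]
      have : (findNl t + 1).toNat = (findNl t).toNat + 1 := by omega
      simp [this]

-- value of sum(len(s) + 1 for s in l)
def sumLens (l : List (List Char)) : Int := (l.map (fun s => (s.length : Int) + 1)).sum

theorem loopRel_eq_segs (n : Nat) (cs : List Char) :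
    loopRel n cs = if (segsNl cs).length ≤ n then (cs.length : Int)
                   else sumLens ((segsNl cs).take n) := by
  induction n generalizing cs with
  | zero =>
    have := segsNl_ne_nil cs
    rw [loopRel, if_neg (by simp [List.length_eq_zero_iff]; omega)]
    simp [sumLens]
  | succ n ih =>
    rcases findNl_cases cs with h | ⟨h0, hlt⟩
    · rw [loopRel, if_pos h, if_pos (by simp [segsNl_of_neg cs h])]
    · have hne : findNl cs ≠ -1 := by omega
      rw [loopRel, if_neg hne, ih, segsNl_of_pos cs h0]
      have hlen : ((cs.drop ((findNl cs).toNat + 1)).length : Int) = cs.length - (findNl cs + 1) := by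
        simp [List.length_drop]; omega
      have htake : (cs.take (findNl cs).toNat).length = (findNl cs).toNat := by
        simp [List.length_take]; omega
      by_cases hc : (segsNl (cs.drop ((findNl cs).toNat + 1))).length ≤ n
      · rw [if_pos hc, if_pos (by simp; omega), hlen]; ring
      · rw [if_neg hc, if_neg (by simp; omega)]
        simp only [List.take_succ_cons, sumLens, List.map_cons, List.sum_cons, htake]
        omega

theorem indexLoop_eq_loopRel (text : String) (n : Nat) (k : Nat) (hk : k ≤ text.toList.length) :
    indexLoop text n (k : Int) = (k : Int) + loopRel n (text.toList.drop k) := by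
  induction n generalizing k with
  | zero => simp [indexLoop, loopRel]
  | succ n ih =>
    rw [indexLoop]
    have hsep : "\n".toList = ['\n'] := rfl
    rw [PySem.Str.findFrom_eq, hsep, PySem.Chars.findFrom_natCast _ _ k hk, find_single]
    set r := findNl (text.toList.drop k) with hr
    rcases findNl_cases (text.toList.drop k) with h | ⟨h0, hlt⟩
    · rw [← hr] at h
      rw [if_pos h, if_pos (rfl : (-1 : Int) = -1)]
      rw [loopRel, if_pos h]
      simp only [PySem.Str.len, List.length_drop]
      omega
    · rw [← hr] at h0 hlt
      rw [if_neg (show ¬(r = -1) by omega)]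
      rw [if_neg (show ¬((k : Int) + r = -1) by omega)]
      have harith : (k : Int) + r + 1 = ((k + r.toNat + 1 : Nat) : Int) := by push_cast; omega
      have hlen : (text.toList.drop k).length = text.toList.length - k := List.length_drop
      have hk' : k + r.toNat + 1 ≤ text.toList.length := by
        rw [hlen] at hlt; omega
      rw [harith, ih (k + r.toNat + 1) hk']
      rw [loopRel, if_neg (show ¬(r = -1) by omega)]
      rw [List.drop_drop]
      have h2 : k + (r.toNat + 1) = k + r.toNat + 1 := by omega
      rw [h2, ← harith]
      ring

theorem split?_eq (text : String) :
    (PySem.Str.split? text "\n").getD [] = (segsNl text.toList).map String.ofList := by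
  rw [PySem.Str.split?]
  have hsep : "\n".toList = ['\n'] := rfl
  rw [hsep, PySem.Chars.split?, if_neg (by simp), splitOn_single]
  rfl

-- ===== VERDICT (by name: the statement is the Claim_ definition above) =====
theorem index_at_line_spec : Claim_equal_index_at_line := by
  intro text line _
  unfold Spec_index_at_line index_at_line index_at_line_alt
  by_cases h1 : line ≤ 1
  · rw [if_pos h1, if_pos h1]
  · rw [if_neg h1, if_neg h1]
    have h0 : ((line - 1).toNat : Int) = line - 1 := by omega
    rw [split?_eq]
    have hzero : (0 : Int) = ((0 : Nat) : Int) := rfl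
    rw [hzero, indexLoop_eq_loopRel text _ 0 (by omega), List.drop_zero, loopRel_eq_segs]
    have hlenseg : PySem.List.len ((segsNl text.toList).map String.ofList)
        = ((segsNl text.toList).length : Int) := by
      rw [PySem.List.len_eq]; simp
    by_cases hc : (segsNl text.toList).length ≤ (line - 1).toNat
    · rw [if_pos hc, if_pos (by rw [hlenseg]; omega)]
      simp [PySem.Str.len]
    · rw [if_neg hc, if_neg (by rw [hlenseg]; omega)]
      rw [PySem.List.slice_to _ (by omega), ← List.map_take]
      rw [List.foldl_map, PySem.List.foldl_add]
      simp only [sumLens, PySem.Str.len, String.toList_ofList]
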